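-- pv_equiv track=rewrite | github.com/snow-apple/random-qec | stabilizer.py | get_initial
-- ===== SOURCE A (Python) =====
-- def get_initial(n):
--     initial_states = ['0', '1']
--     initial_logs = ['X', 'Z']
--     initial_stabs = []
--     for i in range(n-1):
--         for j in range(len(initial_logs)):
--             initial_logs[j] += 'I'
--         for j in range(len(initial_states)):
--             initial_states[j] += '0'
--         initial_stabs.append('I'*n)
--     for j in range(len(initial_logs)):
--             initial_logs[j] += '+'
--     count = 1
--     for j in range(len(initial_stabs)):
--         initial_stabs[j]= initial_stabs[j][:count] + 'Z' + initial_stabs[j][count+1:] + "+"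
--         count+=1
--     return initial_states, initial_logs, initial_stabs
-- ===== SOURCE B (Python) =====
-- def get_initial(n):
--     tail0 = '0' * (n - 1)
--     tailI = 'I' * (n - 1)
--     initial_states = ['0' + tail0, '1' + tail0]
--     initial_logs = ['X' + tailI + '+', 'Z' + tailI + '+']
--     initial_stabs = ['I' * (j + 1) + 'Z' + 'I' * (n - j - 2) + '+'
--                      for j in range(n - 1)]
--     return initial_states, initial_logs, initial_stabs
-- ===== Notes on version B (the rewrite author's own statement) =====
-- stated objective: simpler
-- what changed: B builds the two states, two logs and n-1 stabilizers by direct closed-form string expressions and one comprehension, replacing A's incremental append loops and the in-place character-replacement pass.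
import Mathlib
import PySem

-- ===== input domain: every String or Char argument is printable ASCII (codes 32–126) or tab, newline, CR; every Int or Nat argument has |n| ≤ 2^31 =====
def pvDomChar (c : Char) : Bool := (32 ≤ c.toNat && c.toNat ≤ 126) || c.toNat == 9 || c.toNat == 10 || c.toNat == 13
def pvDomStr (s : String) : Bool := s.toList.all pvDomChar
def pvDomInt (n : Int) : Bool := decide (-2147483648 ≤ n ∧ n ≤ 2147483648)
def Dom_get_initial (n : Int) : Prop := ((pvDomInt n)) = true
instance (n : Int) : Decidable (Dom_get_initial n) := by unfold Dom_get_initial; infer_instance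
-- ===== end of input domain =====

-- B replaces A's incremental append loops by closed-form string construction (objective: simpler); same return value.

-- ===== PORT A =====
-- body of A's outer `for i in range(n-1)` loop: logs += 'I', states += '0', stabs.append('I'*n)
def giStep (n : Int) (acc : List String × List String × List String) (_i : Int) :
    List String × List String × List String :=
  let logs := acc.2.1.map (fun s => s ++ "I")
  let states := acc.1.map (fun s => s ++ "0")
  let stabs := acc.2.2 ++ [String.ofList (PySem.List.pyRepeat ['I'] n)]
  (states, logs, stabs)

def get_initial (n : Int) : List String × List String × List String :=
  let r := (PySem.List.pyRange 0 (n - 1) 1).foldl (giStep n)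
      (["0", "1"], ["X", "Z"], ([] : List String))
  let logs := r.2.1.map (fun s => s ++ "+")
  -- `count` starts at 1 and equals j+1 at index j: enumerate with start 1
  let stabs := (PySem.List.enumerate r.2.2 1).map (fun p =>
      PySem.Str.slice p.2 none (some p.1) ++ "Z" ++
      PySem.Str.slice p.2 (some (p.1 + 1)) none ++ "+")
  (r.1, logs, stabs)

-- ===== PORT B =====
def get_initial_alt (n : Int) : List String × List String × List String :=
  let tail0 := String.ofList (PySem.List.pyRepeat ['0'] (n - 1))
  let tailI := String.ofList (PySem.List.pyRepeat ['I'] (n - 1))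
  (["0" ++ tail0, "1" ++ tail0],
   ["X" ++ tailI ++ "+", "Z" ++ tailI ++ "+"],
   (PySem.List.pyRange 0 (n - 1) 1).map (fun j =>
     String.ofList (PySem.List.pyRepeat ['I'] (j + 1)) ++ "Z" ++
     String.ofList (PySem.List.pyRepeat ['I'] (n - j - 2)) ++ "+"))

-- ===== PRECONDITION & SPEC =====
def Spec_get_initial (n : Int) (out : List String × List String × List String) : Prop := out = get_initial_alt n
instance (n : Int) (out : List String × List String × List String) : Decidable (Spec_get_initial n out) := by unfold Spec_get_initial; infer_instance

-- ===== CLAIM (what is proved, stated in full; the proofs are below) =====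
def Claim_equal_get_initial : Prop := ∀ (n : Int), Dom_get_initial n → Spec_get_initial n (get_initial n)

-- ===== LEMMAS AND PROOFS =====

lemma gi_fold (n : Int) (m : Nat) :
    (PySem.List.pyRange 0 (m : Int) 1).foldl (giStep n)
      (["0", "1"], ["X", "Z"], ([] : List String))
    = (["0" ++ String.ofList (List.replicate m '0'), "1" ++ String.ofList (List.replicate m '0')],
       ["X" ++ String.ofList (List.replicate m 'I'), "Z" ++ String.ofList (List.replicate m 'I')],
       List.replicate m (String.ofList (List.replicate n.toNat 'I'))) := by
  induction m with
  | zero =>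
      rw [Nat.cast_zero, PySem.List.pyRange_one_eq_nil le_rfl]
      simp
  | succ k ih =>
      have hc : ((k + 1 : Nat) : Int) = (k : Int) + 1 := by push_cast; ring
      rw [hc, PySem.List.pyRange_one_succ_right (by positivity), List.foldl_append, ih]
      simp [giStep, ← String.toList_inj, PySem.List.pyRepeat_singleton, List.replicate_succ']

lemma enum_replicate {α : Type} (x : α) (m : Nat) (s : Int) :
    PySem.List.enumerate (List.replicate m x) s
    = (List.range m).map (fun (k : Nat) => (s + (k : Int), x)) := by
  induction m generalizing s with
  | zero => simp [PySem.List.enumerate_nil]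
  | succ k ih =>
      rw [List.replicate_succ, PySem.List.enumerate_cons, ih, List.range_succ_eq_map,
          List.map_cons, List.map_map]
      refine congrArg₂ List.cons (by simp) (List.map_congr_left ?_)
      intro a _
      simp only [Function.comp, Prod.mk.injEq]
      refine ⟨by omega, trivial⟩

lemma stab_elem (n : Int) (m k : Nat) (hn : n = (m : Int) + 1) (hk : k < m) :
    PySem.Str.slice (String.ofList (List.replicate n.toNat 'I')) none (some (1 + (k : Int))) ++ "Z" ++
      PySem.Str.slice (String.ofList (List.replicate n.toNat 'I')) (some (1 + (k : Int) + 1)) none ++ "+"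
    = String.ofList (PySem.List.pyRepeat ['I'] ((k : Int) + 1)) ++ "Z" ++
      String.ofList (PySem.List.pyRepeat ['I'] (n - (k : Int) - 2)) ++ "+" := by
  have e1 : PySem.List.slice (List.replicate n.toNat 'I') none (some (1 + (k : Int)))
      = List.replicate (k + 1) 'I' := by
    rw [PySem.List.slice_to _ (by positivity), List.take_replicate]
    congr 1; omega
  have e2 : PySem.List.slice (List.replicate n.toNat 'I') (some (1 + (k : Int) + 1)) none
      = List.replicate (m - 1 - k) 'I' := by
    rw [PySem.List.slice_from _ (by positivity), List.drop_replicate]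
    congr 1; omega
  have e3 : PySem.List.pyRepeat ['I'] ((k : Int) + 1) = List.replicate (k + 1) 'I' := by
    rw [PySem.List.pyRepeat_singleton]; congr 1
  have e4 : PySem.List.pyRepeat ['I'] (n - (k : Int) - 2) = List.replicate (m - 1 - k) 'I' := by
    rw [PySem.List.pyRepeat_singleton]; congr 1; omega
  apply String.toList_injective
  simp [PySem.Str.toList_slice, PySem.Chars.slice_eq_listSlice, e1, e2, e3, e4]

-- ===== VERDICT (by name: the statement is the Claim_ definition above) =====
theorem get_initial_spec : Claim_equal_get_initial := by
  intro n _
  unfold Spec_get_initial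
  by_cases h : n ≤ 1
  · simp only [get_initial, get_initial_alt]
    rw [PySem.List.pyRange_one_eq_nil (by omega : n - 1 ≤ 0)]
    simp [PySem.List.pyRepeat_singleton, show (n - 1).toNat = 0 from by omega,
          PySem.List.enumerate_nil]
  · have hm : (((n - 1).toNat : Nat) : Int) = n - 1 := Int.toNat_of_nonneg (by omega)
    set m := (n - 1).toNat with hmdef
    simp only [get_initial, get_initial_alt]
    rw [← hm, gi_fold, enum_replicate, PySem.List.pyRange_zero_natCast]
    simp only [List.map_map]
    simp only [Prod.mk.injEq]
    refine ⟨?_, ?_, ?_⟩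
    · simp [PySem.List.pyRepeat_singleton]
    · simp [PySem.List.pyRepeat_singleton]
    · refine List.map_congr_left ?_
      intro k hk
      rw [List.mem_range] at hk
      simp only [Function.comp]
      exact stab_elem n m k (by omega) hk
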